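-- pv_equiv track=rewrite | github.com/JoinMarket-Org/joinmarket-clientserver | src/jmbitcoin/output_descriptors.py | descriptor_checksum
-- ===== SOURCE A (Python) =====
-- def poly_mod(c: int, val: int) -> int:
--     """
--     :meta private:
--     Function to compute modulo over the polynomial used for descriptor checksums
--     From: https://github.com/bitcoin/bitcoin/blob/master/src/script/descriptor.cpp
--     """
--     c0 = c >> 35
--     c = ((c & 0x7FFFFFFFF) << 5) ^ val
--     if c0 & 1:
--         c ^= 0xF5DEE51989
--     if c0 & 2:
--         c ^= 0xA9FDCA3312
--     if c0 & 4:
--         c ^= 0x1BAB10E32D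
--     if c0 & 8:
--         c ^= 0x3706B1677A
--     if c0 & 16:
--         c ^= 0x644D626FFD
--     return c
--
-- def descriptor_checksum(desc: str) -> str:
--     """
--     Compute the checksum for a descriptor
--     :param desc: The descriptor string to compute a checksum for
--     :return: A checksum
--     """
--     INPUT_CHARSET = "0123456789()[],'/*abcdefgh@:$%{}IJKLMNOPQRSTUVWXYZ&+-.;<=>?!^_|~ijklmnopqrstuvwxyzABCDEFGH`#\"\\ "
--     CHECKSUM_CHARSET = "qpzry9x8gf2tvdw0s3jn54khce6mua7l"
--
--     c = 1
--     cls = 0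
--     clscount = 0
--     for ch in desc:
--         pos = INPUT_CHARSET.find(ch)
--         if pos == -1:
--             return ""
--         c = poly_mod(c, pos & 31)
--         cls = cls * 3 + (pos >> 5)
--         clscount += 1
--         if clscount == 3:
--             c = poly_mod(c, cls)
--             cls = 0
--             clscount = 0
--     if clscount > 0:
--         c = poly_mod(c, cls)
--     for j in range(0, 8):
--         c = poly_mod(c, 0)
--     c ^= 1
--
--     ret = [''] * 8
--     for j in range(0, 8):
--         ret[j] = CHECKSUM_CHARSET[(c >> (5 * (7 - j))) & 31]
--     return ''.join(ret)
-- ===== SOURCE B (Python) =====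
-- def descriptor_checksum(desc: str) -> str:
--     INPUT_CHARSET = "0123456789()[],'/*abcdefgh@:$%{}IJKLMNOPQRSTUVWXYZ&+-.;<=>?!^_|~ijklmnopqrstuvwxyzABCDEFGH`#\"\\ "
--     CHECKSUM_CHARSET = "qpzry9x8gf2tvdw0s3jn54khce6mua7l"
--     try:
--         pos = [INPUT_CHARSET.index(ch) for ch in desc]
--     except ValueError:
--         return ""
--     # 5-bit symbol stream: each group of 3 chars yields its three low-5-bit symbols
--     # followed by the group's base-3 class symbol
--     symbols = []
--     for i in range(0, len(pos), 3):
--         grp = pos[i:i + 3]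
--         symbols += [p & 31 for p in grp]
--         cls = 0
--         for p in grp:
--             cls = cls * 3 + (p >> 5)
--         symbols.append(cls)
--     # GF(32) log/exp tables (modulus x^5 + x^3 + 1, generator 2)
--     EXP = [0] * 31
--     LOG = [0] * 32
--     v = 1
--     for k in range(31):
--         EXP[k] = v
--         LOG[v] = k
--         v <<= 1
--         if v & 32:
--             v ^= 41
--     # the degree-8 generator polynomial's lower coefficients (monic lead implied)
--     GENPOLY = [(0xF5DEE51989 >> (5 * (7 - j))) & 31 for j in range(8)]
--     # one long division of the whole message polynomial by the generator:
--     # message = leading 1, the symbol stream, then 8 zero symbols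
--     poly = [1] + symbols + [0] * 8
--     for i in range(len(poly) - 8):
--         e = poly[i]
--         if e:
--             le = LOG[e]
--             for j in range(8):
--                 gj = GENPOLY[j]
--                 if gj:
--                     poly[i + 1 + j] ^= EXP[(le + LOG[gj]) % 31]
--     c = 0
--     for s in poly[-8:]:
--         c = (c << 5) | s
--     c ^= 1
--     return ''.join(CHECKSUM_CHARSET[(c >> (5 * (7 - j))) & 31] for j in range(8))
-- ===== Notes on version B (the rewrite author's own statement) =====
-- stated objective: alternative
-- what changed: A streams each 5-bit symbol through poly_mod, a 40-bit LFSR step with five hardcoded masked generator constants; B instead builds the whole message as a coefficient list (leading 1, grouped symbols, 8 zero symbols) and performs one textbook Reed-Solomon long division by the degree-8 generator polynomial over GF(32), multiplying via log/exp tables, then packs the 8-symbol remainder.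
import Mathlib
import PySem

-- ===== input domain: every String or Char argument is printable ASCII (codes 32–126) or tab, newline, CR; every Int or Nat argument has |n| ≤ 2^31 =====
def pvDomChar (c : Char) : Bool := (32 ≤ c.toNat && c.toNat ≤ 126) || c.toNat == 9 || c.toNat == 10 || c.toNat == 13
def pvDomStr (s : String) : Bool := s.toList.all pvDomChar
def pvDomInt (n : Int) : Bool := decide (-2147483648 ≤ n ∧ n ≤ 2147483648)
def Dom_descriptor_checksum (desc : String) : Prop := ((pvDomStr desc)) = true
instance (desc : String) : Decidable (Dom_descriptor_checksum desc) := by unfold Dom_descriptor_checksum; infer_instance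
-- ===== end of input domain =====

-- B replaces A's streaming 40-bit poly_mod LFSR (cls/clscount counters, hardcoded masked
-- generator constants) by one Reed–Solomon-style long division of the whole message
-- polynomial over GF(32), using log/exp multiplication tables (objective: alternative).

-- ===== PORT A =====
def pvInputCharset : String := "0123456789()[],'/*abcdefgh@:$%{}IJKLMNOPQRSTUVWXYZ&+-.;<=>?!^_|~ijklmnopqrstuvwxyzABCDEFGH`#\"\\ "
def pvChecksumCharset : String := "qpzry9x8gf2tvdw0s3jn54khce6mua7l"

def polyMod (c : Nat) (val : Nat) : Nat :=
  let c0 := c >>> 35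
  let c := ((c &&& 0x7FFFFFFFF) <<< 5) ^^^ val
  let c := if c0 &&& 1 ≠ 0 then c ^^^ 0xF5DEE51989 else c
  let c := if c0 &&& 2 ≠ 0 then c ^^^ 0xA9FDCA3312 else c
  let c := if c0 &&& 4 ≠ 0 then c ^^^ 0x1BAB10E32D else c
  let c := if c0 &&& 8 ≠ 0 then c ^^^ 0x3706B1677A else c
  let c := if c0 &&& 16 ≠ 0 then c ^^^ 0x644D626FFD else c
  c

-- A's loop body (the early 'return ""' is modelled as the none state)
def pvStepA (st : Option (Nat × Nat × Nat)) (ch : Char) : Option (Nat × Nat × Nat) :=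
  match st with
  | none => none
  | some (c, cls, clscount) =>
    let pos : Int := PySem.Str.find pvInputCharset (String.mk [ch])
    if pos = -1 then none
    else
      let pos : Nat := pos.toNat
      let c := polyMod c (pos &&& 31)
      let cls := cls * 3 + (pos >>> 5)
      let clscount := clscount + 1
      if clscount = 3 then some (polyMod c cls, 0, 0)
      else some (c, cls, clscount)

def descriptor_checksum (desc : String) : String :=
  let st := desc.toList.foldl pvStepA (some (1, 0, 0))
  match st with
  | none => ""
  | some (c, cls, clscount) =>
    let c := if clscount > 0 then polyMod c cls else c
    let c := (List.range 8).foldl (fun c _ => polyMod c 0) c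
    let c := c ^^^ 1
    String.mk ((List.range 8).map (fun j =>
      pvChecksumCharset.toList.getD ((c >>> (5 * (7 - j))) &&& 31) ' '))

-- ===== PORT B =====
-- the comprehension [INPUT_CHARSET.index(ch) for ch in desc] inside try/except:
-- the first missing character (ValueError) makes the whole result none
def pvPositions : List Char → Option (List Nat)
  | [] => some []
  | ch :: t =>
    match PySem.List.index? pvInputCharset.toList ch with
    | none => none
    | some p => (pvPositions t).map (p :: ·)

-- the loop 'for i in range(0, len(pos), 3): grp = pos[i:i+3]' (successive slices of 3)
def pvChunk3 (ps : List Nat) : List (List Nat) :=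
  match ps with
  | [] => []
  | p :: t => (p :: t.take 2) :: pvChunk3 (t.drop 2)
termination_by ps.length
decreasing_by simp [List.length_drop]

-- GF(32) log/exp tables, built exactly like Source B's loop over (EXP, LOG, v)
def pvTabs : List Nat × List Nat × Nat :=
  (List.range 31).foldl (fun s k =>
    let exp := s.1.set k s.2.2
    let log := s.2.1.set s.2.2 k
    let v := s.2.2 <<< 1
    let v := if v &&& 32 ≠ 0 then v ^^^ 41 else v
    (exp, log, v)) (List.replicate 31 0, List.replicate 32 0, 1)

def pvEXP : List Nat := pvTabs.1
def pvLOG : List Nat := pvTabs.2.1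

def pvGenpoly : List Nat := (List.range 8).map (fun j => (0xF5DEE51989 >>> (5 * (7 - j))) &&& 31)

def descriptor_checksum_alt (desc : String) : String :=
  match pvPositions desc.toList with
  | none => ""
  | some pos =>
    let symbols := (pvChunk3 pos).flatMap (fun grp =>
      grp.map (fun p => p &&& 31) ++ [grp.foldl (fun cl p => cl * 3 + (p >>> 5)) 0])
    let poly := 1 :: (symbols ++ List.replicate 8 0)
    let poly := (List.range (poly.length - 8)).foldl (fun poly i =>
      let e := poly.getD i 0
      if e ≠ 0 then
        (List.range 8).foldl (fun poly j =>
          let gj := pvGenpoly.getD j 0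
          if gj ≠ 0 then
            poly.set (i + 1 + j)
              ((poly.getD (i + 1 + j) 0) ^^^ (pvEXP.getD ((pvLOG.getD e 0 + pvLOG.getD gj 0) % 31) 0))
          else poly) poly
      else poly) poly
    let c := (poly.drop (poly.length - 8)).foldl (fun c s => (c <<< 5) ||| s) 0
    let c := c ^^^ 1
    String.mk ((List.range 8).map (fun j =>
      pvChecksumCharset.toList.getD ((c >>> (5 * (7 - j))) &&& 31) ' '))

-- ===== PRECONDITION & SPEC =====
def Spec_descriptor_checksum (desc : String) (out : String) : Prop := out = descriptor_checksum_alt desc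
instance (desc : String) (out : String) : Decidable (Spec_descriptor_checksum desc out) := by unfold Spec_descriptor_checksum; infer_instance

-- ===== CLAIM (what is proved, stated in full; the proofs are below) =====
def Claim_equal_descriptor_checksum : Prop := ∀ (desc : String), Dom_descriptor_checksum desc → Spec_descriptor_checksum desc (descriptor_checksum desc)

-- ===== LEMMAS AND PROOFS =====

-- ---------- character lookup: str.find on a one-char needle vs list.index ----------

def pvPosA (ch : Char) : Int := PySem.Str.find pvInputCharset (String.mk [ch])

lemma pvSingleton_infix_iff (ch : Char) (l : List Char) : [ch] <:+: l ↔ ch ∈ l := by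
  constructor
  · intro h; exact h.mem (by simp)
  · intro h; obtain ⟨s, t, rfl⟩ := List.append_of_mem h
    exact ⟨s, t, by simp⟩

lemma pvSingleton_prefix_drop_iff (ch : Char) (l : List Char) (k : Nat) :
    [ch] <+: l.drop k ↔ l[k]? = some ch := by
  rw [← List.head?_drop]
  constructor
  · intro ⟨t, ht⟩; rw [← ht]; rfl
  · intro h
    match hd : l.drop k with
    | [] => rw [hd] at h; simp at h
    | x :: t =>
      rw [hd] at h; simp at h
      exact ⟨t, by simp [h]⟩

lemma pvIndex?_eq_find (l : List Char) (ch : Char) :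
    PySem.List.index? l ch =
      (if PySem.Chars.find l [ch] = -1 then none else some (PySem.Chars.find l [ch]).toNat) := by
  by_cases hm : ch ∈ l
  · have hf : PySem.Chars.find l [ch] ≠ -1 :=
      (PySem.Chars.find_ne_neg_one_iff l [ch]).2 ((pvSingleton_infix_iff ch l).2 hm)
    have hnn : 0 ≤ PySem.Chars.find l [ch] := by
      have := PySem.Chars.neg_one_le_find l [ch]; omega
    obtain ⟨hpre, hmin⟩ := PySem.Chars.find_spec hnn
    rw [if_neg hf]
    set k := (PySem.Chars.find l [ch]).toNat with hk
    have hget : l[k]? = some ch := (pvSingleton_prefix_drop_iff ch l k).1 hpre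
    have hklen : k < l.length := by
      by_contra h
      rw [List.getElem?_eq_none (by omega)] at hget; simp at hget
    rw [PySem.List.index?_eq_some_iff]
    refine ⟨l.take k, l.drop (k+1), ?_, by simp [hklen.le], ?_⟩
    · conv_lhs => rw [← List.take_append_drop k l]
      congr 1
      rw [List.drop_eq_getElem_cons hklen]
      simp [List.getElem?_eq_some_iff] at hget
      obtain ⟨h1, h2⟩ := hget
      simp [h2]
    · intro hmem
      obtain ⟨i, hi, hieq⟩ := List.mem_take_iff_getElem.1 hmem
      have : [ch] <+: l.drop i := by
        rw [pvSingleton_prefix_drop_iff]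
        simp [List.getElem?_eq_some_iff]
        exact ⟨by omega, hieq⟩
      exact hmin i (by omega) this
  · rw [(PySem.List.index?_eq_none_iff l ch).2 hm, if_pos]
    exact (PySem.Chars.find_eq_neg_one_iff l [ch]).2 (fun h => hm ((pvSingleton_infix_iff ch l).1 h))

lemma pvPosA_eq (ch : Char) : pvPosA ch = PySem.Chars.find pvInputCharset.toList [ch] := by
  have h : (String.mk [ch]).toList = [ch] := Eq.symm (String.ofList_eq.mp rfl)
  simp [pvPosA, h]

lemma pvCharsetLen : pvInputCharset.toList.length = 95 := by decide

lemma pvIndex?_charset (ch : Char) :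
    PySem.List.index? pvInputCharset.toList ch =
      (if pvPosA ch = -1 then none else some (pvPosA ch).toNat) := by
  rw [pvIndex?_eq_find, pvPosA_eq]

lemma pvPos_lt {ch : Char} (h : pvPosA ch ≠ -1) : (pvPosA ch).toNat < 95 := by
  have hidx := pvIndex?_charset ch
  rw [if_neg h] at hidx
  obtain ⟨hk, -, -⟩ := PySem.List.getElem_of_index?_eq_some hidx
  rwa [pvCharsetLen] at hk

set_option maxRecDepth 10000 in
lemma pvPositions_valid : ∀ (l : List Char), (∀ ch ∈ l, pvPosA ch ≠ -1) →
    pvPositions l = some (l.map (fun ch => (pvPosA ch).toNat)) := by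
  intro l
  induction l with
  | nil => intro _; rfl
  | cons ch t ih =>
    intro hv
    have hch : pvPosA ch ≠ -1 := hv ch (by simp)
    have ht := ih (fun c hc => hv c (by simp [hc]))
    show (match PySem.List.index? pvInputCharset.toList ch with
      | none => none
      | some p => (pvPositions t).map (p :: ·)) = _
    rw [pvIndex?_charset ch, if_neg hch, ht]
    rfl

set_option maxRecDepth 10000 in
lemma pvPositions_invalid : ∀ (l : List Char), (∃ ch ∈ l, pvPosA ch = -1) →
    pvPositions l = none := by
  intro l
  induction l with
  | nil => intro h; simp at h
  | cons ch t ih =>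
    intro hv
    by_cases hch : pvPosA ch = -1
    · show (match PySem.List.index? pvInputCharset.toList ch with
        | none => none
        | some p => (pvPositions t).map (p :: ·)) = none
      rw [pvIndex?_charset ch, if_pos hch]
    · obtain ⟨c0, hc0, hc0eq⟩ := hv
      have hc0t : c0 ∈ t := by
        rcases List.mem_cons.1 hc0 with h | h
        · exact absurd (h ▸ hc0eq) hch
        · exact h
      show (match PySem.List.index? pvInputCharset.toList ch with
        | none => none
        | some p => (pvPositions t).map (p :: ·)) = none
      rw [pvIndex?_charset ch, if_neg hch, ih ⟨c0, hc0t, hc0eq⟩]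
      rfl

-- ---------- A side: the streaming loop equals a polyMod fold over the flattened symbols ----------

def pvStep (s : Nat × Nat × Nat) (pos : Nat) : Nat × Nat × Nat :=
  let c := polyMod s.1 (pos &&& 31)
  let cls := s.2.1 * 3 + (pos >>> 5)
  let cnt := s.2.2 + 1
  if cnt = 3 then (polyMod c cls, 0, 0) else (c, cls, cnt)

def pvFinal (s : Nat × Nat × Nat) : Nat := if s.2.2 > 0 then polyMod s.1 s.2.1 else s.1

def pvChunkArgs (grp : List Nat) : List Nat :=
  grp.map (fun p => p &&& 31) ++ [grp.foldl (fun cl p => cl * 3 + (p >>> 5)) 0]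

lemma pvMain (ps : List Nat) : ∀ (c : Nat),
    pvFinal (ps.foldl pvStep (c, 0, 0))
      = ((pvChunk3 ps).flatMap pvChunkArgs).foldl polyMod c := by
  induction ps using pvChunk3.induct with
  | case1 => intro c; simp [pvChunk3, pvFinal]
  | case2 p t ih =>
    intro c
    match t with
    | [] => simp [pvChunk3, pvStep, pvFinal, pvChunkArgs]
    | [b] => simp [pvChunk3, pvStep, pvFinal, pvChunkArgs]
    | b :: d :: t' =>
      have h3 : (p :: b :: d :: t').foldl pvStep (c, 0, 0)
          = t'.foldl pvStep
              (polyMod (polyMod (polyMod (polyMod c (p &&& 31)) (b &&& 31)) (d &&& 31))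
                (((0 * 3 + (p >>> 5)) * 3 + (b >>> 5)) * 3 + (d >>> 5)), 0, 0) := by
        simp [List.foldl_cons, pvStep]
      rw [h3]
      have ih' := ih (polyMod (polyMod (polyMod (polyMod c (p &&& 31)) (b &&& 31)) (d &&& 31))
                (((0 * 3 + (p >>> 5)) * 3 + (b >>> 5)) * 3 + (d >>> 5)))
      simp only [List.drop] at ih'
      rw [ih']
      simp [pvChunk3, pvChunkArgs, List.foldl_cons]

lemma pvNoneAbsorb (l : List Char) : l.foldl pvStepA none = none := by
  induction l with
  | nil => rfl
  | cons ch t ih => simpa [pvStepA] using ih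

lemma pvAfoldValid : ∀ (l : List Char), (∀ ch ∈ l, pvPosA ch ≠ -1) →
    ∀ (s : Nat × Nat × Nat),
    l.foldl pvStepA (some s)
      = some ((l.map (fun ch => (pvPosA ch).toNat)).foldl pvStep s) := by
  intro l
  induction l with
  | nil => intro _ s; rfl
  | cons ch t ih =>
    intro hv s
    have hch : pvPosA ch ≠ -1 := hv ch (by simp)
    have ht : ∀ c ∈ t, pvPosA c ≠ -1 := fun c hc => hv c (by simp [hc])
    simp only [List.foldl_cons, List.map_cons]
    have hstep : pvStepA (some s) ch = some (pvStep s (pvPosA ch).toNat) := by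
      obtain ⟨c, cls, cnt⟩ := s
      simp only [pvStepA, pvStep, pvPosA] at *
      rw [if_neg hch]
      split <;> rfl
    rw [hstep, ih ht]

lemma pvAfoldInvalid : ∀ (l : List Char), (∃ ch ∈ l, pvPosA ch = -1) →
    ∀ (s : Nat × Nat × Nat), l.foldl pvStepA (some s) = none := by
  intro l
  induction l with
  | nil => intro h; simp at h
  | cons ch t ih =>
    intro hv s
    by_cases hch : pvPosA ch = -1
    · have hstep : pvStepA (some s) ch = none := by
        obtain ⟨c, cls, cnt⟩ := s
        simp only [pvStepA, pvPosA] at *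
        rw [if_pos hch]
      rw [List.foldl_cons, hstep, pvNoneAbsorb]
    · obtain ⟨c0, hc0, hc0eq⟩ := hv
      have hc0t : c0 ∈ t := by
        rcases List.mem_cons.1 hc0 with h | h
        · exact absurd (h ▸ hc0eq) hch
        · exact h
      have hstep : ∃ s', pvStepA (some s) ch = some s' := by
        obtain ⟨c, cls, cnt⟩ := s
        simp only [pvStepA, pvPosA] at *
        rw [if_neg hch]
        split <;> exact ⟨_, rfl⟩
      obtain ⟨s', hs'⟩ := hstep
      rw [List.foldl_cons, hs', ih ⟨c0, hc0t, hc0eq⟩]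

lemma pvRep8 (c : Nat) :
    (List.replicate 8 (0 : Nat)).foldl polyMod c
      = (List.range 8).foldl (fun c _ => polyMod c 0) c := rfl

-- ---------- the GF(32) tables evaluated ----------

lemma pvEXP_eq : pvEXP =
    [1,2,4,8,16,9,18,13,26,29,19,15,30,21,3,6,12,24,25,27,31,23,7,14,28,17,11,22,5,10,20] := by
  decide

lemma pvLOG_eq : pvLOG =
    [0,0,1,14,2,28,15,22,3,5,29,26,16,7,23,11,4,25,6,10,30,13,27,21,17,18,8,19,24,9,12,20] := by
  decide

lemma pvGenpoly_eq : pvGenpoly = [30,23,15,14,10,6,12,9] := by decide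

-- the multiplication Source B's inner loop performs (0 factors short-circuited)
def pvGmul (a b : Nat) : Nat :=
  if a ≠ 0 ∧ b ≠ 0 then pvEXP.getD ((pvLOG.getD a 0 + pvLOG.getD b 0) % 31) 0 else 0

lemma pvGmul_lt (a b : Nat) : pvGmul a b < 32 := by
  unfold pvGmul
  split
  · rw [pvEXP_eq]
    rw [List.getD_eq_getElem?_getD]
    set k := (pvLOG.getD a 0 + pvLOG.getD b 0) % 31 with hk
    match h : ([1,2,4,8,16,9,18,13,26,29,19,15,30,21,3,6,12,24,25,27,31,23,7,14,28,17,11,22,5,10,20] : List Nat)[k]? with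
    | none => simp
    | some x =>
      have hx : x ∈ ([1,2,4,8,16,9,18,13,26,29,19,15,30,21,3,6,12,24,25,27,31,23,7,14,28,17,11,22,5,10,20] : List Nat) :=
        List.mem_of_getElem? h
      have : ∀ y ∈ ([1,2,4,8,16,9,18,13,26,29,19,15,30,21,3,6,12,24,25,27,31,23,7,14,28,17,11,22,5,10,20] : List Nat), y < 32 := by decide
      simpa using this x hx
  · norm_num

-- the XOR of generator constants selected by the bits of e, exactly polyMod's if-chain
def pvGenmask (e : Nat) : Nat :=
  let c := (0 : Nat)
  let c := if e &&& 1 ≠ 0 then c ^^^ 0xF5DEE51989 else c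
  let c := if e &&& 2 ≠ 0 then c ^^^ 0xA9FDCA3312 else c
  let c := if e &&& 4 ≠ 0 then c ^^^ 0x1BAB10E32D else c
  let c := if e &&& 8 ≠ 0 then c ^^^ 0x3706B1677A else c
  let c := if e &&& 16 ≠ 0 then c ^^^ 0x644D626FFD else c
  c

lemma pvPolyMod_split (c s : Nat) :
    polyMod c s = (((c &&& 0x7FFFFFFFF) <<< 5) ^^^ s) ^^^ pvGenmask (c >>> 35) := by
  simp only [polyMod, pvGenmask]
  split_ifs <;> simp [Nat.xor_assoc]

-- ---------- packing 5-bit symbols into a number ----------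

def pvPack (xs : List Nat) : Nat := xs.foldl (fun c s => (c <<< 5) ||| s) 0

lemma pvShiftXor (a b m : Nat) : (a ^^^ b) <<< m = (a <<< m) ^^^ (b <<< m) := by
  apply Nat.eq_of_testBit_eq; intro i
  simp only [Nat.testBit_shiftLeft, Nat.testBit_xor]
  by_cases h : m ≤ i <;> simp [h]

lemma pvMulAddOr (m a x : Nat) (hx : x < 2^m) : (a <<< m) ||| x = 2^m * a + x := by
  apply Nat.eq_of_testBit_eq; intro i
  rw [Nat.testBit_two_pow_mul_add a hx i]
  simp only [Nat.testBit_or, Nat.testBit_shiftLeft]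
  by_cases h : i < m
  · simp [h, Nat.not_le.2 h]
  · have hge := Nat.not_lt.1 h
    have hxi : x.testBit i = false :=
      Nat.testBit_lt_two_pow (lt_of_lt_of_le hx (Nat.pow_le_pow_right (by norm_num) hge))
    simp [h, hge, hxi]

lemma pvMulAddXor (m a x : Nat) (hx : x < 2^m) : (a <<< m) ^^^ x = 2^m * a + x := by
  apply Nat.eq_of_testBit_eq; intro i
  rw [Nat.testBit_two_pow_mul_add a hx i]
  simp only [Nat.testBit_xor, Nat.testBit_shiftLeft]
  by_cases h : i < m
  · simp [h, Nat.not_le.2 h]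
  · have hge := Nat.not_lt.1 h
    have hxi : x.testBit i = false :=
      Nat.testBit_lt_two_pow (lt_of_lt_of_le hx (Nat.pow_le_pow_right (by norm_num) hge))
    simp [h, hge, hxi]

lemma pvOrLow32 (c s : Nat) (hs : s < 32) : (c <<< 5) ||| s = 32 * c + s := by
  have := pvMulAddOr 5 c s (by norm_num; omega)
  norm_num at this; omega

lemma pvXorLow32 (c s : Nat) (hs : s < 32) : (c <<< 5) ^^^ s = 32 * c + s := by
  have := pvMulAddXor 5 c s (by norm_num; omega)
  norm_num at this; omega

lemma pvXor_lt32 {x y : Nat} (hx : x < 32) (hy : y < 32) : x ^^^ y < 32 := by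
  have h5 : (32 : Nat) = 2 ^ 5 := by norm_num
  rw [h5] at hx hy ⊢
  exact Nat.xor_lt_two_pow hx hy

lemma pvXorMix32 (a b x y : Nat) (hx : x < 32) (hy : y < 32) :
    (32 * a + x) ^^^ (32 * b + y) = 32 * (a ^^^ b) + (x ^^^ y) := by
  have hxy : x ^^^ y < 32 := pvXor_lt32 hx hy
  rw [← pvXorLow32 a x hx, ← pvXorLow32 b y hy, ← pvXorLow32 (a ^^^ b) (x ^^^ y) hxy,
    pvShiftXor]
  simp [Nat.xor_assoc, Nat.xor_comm, Nat.xor_left_comm]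

lemma pvPackFold (xs : List Nat) (hxs : ∀ x ∈ xs, x < 32) : ∀ (c : Nat),
    xs.foldl (fun c s => (c <<< 5) ||| s) c = c * 32 ^ xs.length + pvPack xs := by
  induction xs with
  | nil => intro c; simp [pvPack]
  | cons x t ih =>
    intro c
    have hx : x < 32 := hxs x (by simp)
    have ht : ∀ y ∈ t, y < 32 := fun y hy => hxs y (by simp [hy])
    have hpk : pvPack (x :: t) = x * 32 ^ t.length + pvPack t := by
      show (x :: t).foldl (fun c s => (c <<< 5) ||| s) 0 = _
      rw [List.foldl_cons, pvOrLow32 0 x hx]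
      simpa using ih ht x
    rw [List.foldl_cons, pvOrLow32 c x hx, ih ht, hpk]
    simp [List.length_cons, pow_succ]
    ring

lemma pvPack_cons (x : Nat) (t : List Nat) (hx : x < 32) (ht : ∀ y ∈ t, y < 32) :
    pvPack (x :: t) = x * 32 ^ t.length + pvPack t := by
  show (x :: t).foldl (fun c s => (c <<< 5) ||| s) 0 = _
  rw [List.foldl_cons, pvOrLow32 0 x hx]
  simpa using pvPackFold t ht x

lemma pvPack_lt (xs : List Nat) (hxs : ∀ x ∈ xs, x < 32) : pvPack xs < 32 ^ xs.length := by
  induction xs with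
  | nil => simp [pvPack]
  | cons x t ih =>
    have hx : x < 32 := hxs x (by simp)
    have ht : ∀ y ∈ t, y < 32 := fun y hy => hxs y (by simp [hy])
    rw [pvPack_cons x t hx ht]
    have h1 := ih ht
    have h2 : x * 32 ^ t.length + pvPack t < (x + 1) * 32 ^ t.length := by
      have := Nat.add_lt_add_left h1 (x * 32 ^ t.length)
      calc x * 32 ^ t.length + pvPack t < x * 32 ^ t.length + 32 ^ t.length := this
        _ = (x + 1) * 32 ^ t.length := by ring
    calc x * 32 ^ t.length + pvPack t < (x + 1) * 32 ^ t.length := h2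
      _ ≤ 32 * 32 ^ t.length := Nat.mul_le_mul_right _ (by omega)
      _ = 32 ^ (x :: t).length := by rw [List.length_cons, pow_succ]; ring

lemma pvPack_concat (xs : List Nat) (y : Nat) (hy : y < 32) :
    pvPack (xs ++ [y]) = 32 * pvPack xs + y := by
  show (xs ++ [y]).foldl (fun c s => (c <<< 5) ||| s) 0 = _
  rw [List.foldl_append]
  simp only [List.foldl_cons, List.foldl_nil]
  exact pvOrLow32 _ y hy

lemma pvPack_xor_map (n : Nat) (f g : Nat → Nat) (hf : ∀ j, f j < 32) (hg : ∀ j, g j < 32) :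
    pvPack ((List.range n).map (fun j => f j ^^^ g j))
      = pvPack ((List.range n).map f) ^^^ pvPack ((List.range n).map g) := by
  induction n with
  | zero => simp [pvPack]
  | succ n ih =>
    have hxy : f n ^^^ g n < 32 := pvXor_lt32 (hf n) (hg n)
    rw [List.range_succ]
    simp only [List.map_append, List.map_cons, List.map_nil]
    rw [pvPack_concat _ _ hxy, pvPack_concat _ _ (hf n), pvPack_concat _ _ (hg n), ih,
      pvXorMix32 _ _ _ _ (hf n) (hg n)]

-- the generator-times-element rows packed, for each of the 32 elements (decided once)
lemma pvGenmask_table :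
    ((List.range 32).all (fun e =>
      decide (pvPack ((List.range 8).map (fun j => pvGmul e (pvGenpoly.getD j 0))) = pvGenmask e))) = true := by
  simp only [pvGmul, pvEXP_eq, pvLOG_eq, pvGenpoly_eq]
  decide

lemma pvGenmask_eq {e : Nat} (he : e < 32) :
    pvPack ((List.range 8).map (fun j => pvGmul e (pvGenpoly.getD j 0))) = pvGenmask e :=
  of_decide_eq_true (List.all_eq_true.1 pvGenmask_table e (List.mem_range.2 he))

-- eight polyMod steps from 0 perform no reduction: they just pack the symbols
lemma pvPolyMod_small (c s : Nat) (hc : c < 2 ^ 35) (hs : s < 32) : polyMod c s = 32 * c + s := by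
  have h0 : c >>> 35 = 0 := by
    rw [Nat.shiftRight_eq_div_pow]; exact Nat.div_eq_of_lt hc
  have hand : c &&& 0x7FFFFFFFF = c := by
    have h1 : (0x7FFFFFFFF : Nat) = 2 ^ 35 - 1 := by norm_num
    rw [h1, Nat.and_two_pow_sub_one_eq_mod, Nat.mod_eq_of_lt hc]
  simp only [polyMod, h0, hand]
  norm_num
  exact pvXorLow32 c s hs

lemma pvPolyMod_pack : ∀ (xs : List Nat) (c : Nat), (∀ x ∈ xs, x < 32) →
    (c + 1) * 32 ^ xs.length ≤ 2 ^ 40 →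
    xs.foldl polyMod c = xs.foldl (fun c s => (c <<< 5) ||| s) c := by
  intro xs
  induction xs with
  | nil => intro c _ _; rfl
  | cons x t ih =>
    intro c hxs hb
    have hx : x < 32 := hxs x (by simp)
    have ht : ∀ y ∈ t, y < 32 := fun y hy => hxs y (by simp [hy])
    have h32 : (32 : Nat) ^ t.length ≥ 1 := Nat.one_le_pow _ _ (by norm_num)
    have hc35 : c < 2 ^ 35 := by
      have : (c + 1) * 32 ^ (x :: t).length = (c + 1) * 32 * 32 ^ t.length := by
        rw [List.length_cons, pow_succ]; ring
      rw [this] at hb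
      nlinarith [h32]
    have hb' : (32 * c + x + 1) * 32 ^ t.length ≤ 2 ^ 40 := by
      have h1 : (32 * c + x + 1) ≤ (c + 1) * 32 := by omega
      calc (32 * c + x + 1) * 32 ^ t.length ≤ (c + 1) * 32 * 32 ^ t.length :=
            Nat.mul_le_mul_right _ h1
        _ = (c + 1) * 32 ^ (x :: t).length := by rw [List.length_cons, pow_succ]; ring
        _ ≤ 2 ^ 40 := hb
    rw [List.foldl_cons, List.foldl_cons, pvPolyMod_small c x hc35 hx, pvOrLow32 c x hx]
    exact ih (32 * c + x) ht hb'

lemma pvPack_foldl_polyMod (xs : List Nat) (hxs : ∀ x ∈ xs, x < 32) (hlen : xs.length ≤ 8) :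
    xs.foldl polyMod 0 = pvPack xs := by
  rw [pvPolyMod_pack xs 0 hxs]
  · rfl
  · have : (32 : Nat) ^ xs.length ≤ 32 ^ 8 := Nat.pow_le_pow_right (by norm_num) hlen
    norm_num at this ⊢
    omega

-- ---------- the long-division loop: windows and the invariant ----------

def pvWin (poly : List Nat) (i : Nat) : List Nat := (List.range 8).map (fun j => poly.getD (i + j) 0)

lemma pvWin_eq_drop (l : List Nat) (i : Nat) (h : i + 8 ≤ l.length) :
    pvWin l i = (l.drop i).take 8 := by
  apply List.ext_getElem
  · simp [pvWin]; omega
  · intro k hk1 hk2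
    simp only [pvWin, List.getElem_map, List.getElem_range, List.getElem_take, List.getElem_drop]
    have hlt : i + k < l.length := by simp [pvWin] at hk1; omega
    rw [List.getD_eq_getElem?_getD, List.getElem?_eq_getElem hlt]
    rfl

-- Source B's outer division step (named copy of the lambda in the port)
def pvOuterStep (poly : List Nat) (i : Nat) : List Nat :=
  let e := poly.getD i 0
  if e ≠ 0 then
    (List.range 8).foldl (fun poly j =>
      let gj := pvGenpoly.getD j 0
      if gj ≠ 0 then
        poly.set (i + 1 + j)
          ((poly.getD (i + 1 + j) 0) ^^^ (pvEXP.getD ((pvLOG.getD e 0 + pvLOG.getD gj 0) % 31) 0))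
      else poly) poly
  else poly

lemma pvSet_getD (l : List Nat) (n : Nat) (a : Nat) (k : Nat) :
    (l.set n a).getD k 0 = if k = n ∧ k < l.length then a else l.getD k 0 := by
  by_cases hk : k = n
  · subst hk
    by_cases hlt : k < l.length
    · simp [List.getD_eq_getElem?_getD, hlt]
    · rw [List.set_eq_of_length_le (by omega)]
      simp [hlt]
  · simp [List.getD_eq_getElem?_getD, List.getElem?_set_ne (fun h => hk h.symm), hk]

lemma pvInner_getD (i e : Nat) (he : e ≠ 0) (poly : List Nat) : ∀ (m : Nat),
    ((List.range m).foldl (fun poly j =>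
        if pvGenpoly.getD j 0 ≠ 0 then
          poly.set (i + 1 + j)
            ((poly.getD (i + 1 + j) 0) ^^^
              (pvEXP.getD ((pvLOG.getD e 0 + pvLOG.getD (pvGenpoly.getD j 0) 0) % 31) 0))
        else poly) poly).length = poly.length ∧
    ∀ k, ((List.range m).foldl (fun poly j =>
        if pvGenpoly.getD j 0 ≠ 0 then
          poly.set (i + 1 + j)
            ((poly.getD (i + 1 + j) 0) ^^^
              (pvEXP.getD ((pvLOG.getD e 0 + pvLOG.getD (pvGenpoly.getD j 0) 0) % 31) 0))
        else poly) poly).getD k 0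
      = if i + 1 ≤ k ∧ k < i + 1 + m ∧ k < poly.length
        then poly.getD k 0 ^^^ pvGmul e (pvGenpoly.getD (k - (i + 1)) 0)
        else poly.getD k 0 := by
  intro m
  induction m with
  | zero => exact ⟨rfl, fun k => by rw [if_neg (by omega)]; rfl⟩
  | succ m ih =>
    obtain ⟨ihl, ihd⟩ := ih
    rw [List.range_succ, List.foldl_append]
    simp only [List.foldl_cons, List.foldl_nil]
    set P := (List.range m).foldl (fun poly j =>
        if pvGenpoly.getD j 0 ≠ 0 then
          poly.set (i + 1 + j)
            ((poly.getD (i + 1 + j) 0) ^^^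
              (pvEXP.getD ((pvLOG.getD e 0 + pvLOG.getD (pvGenpoly.getD j 0) 0) % 31) 0))
        else poly) poly with hP
    have hPm : P.getD (i + 1 + m) 0 = poly.getD (i + 1 + m) 0 := by
      rw [ihd, if_neg (by omega)]
    by_cases hgj : pvGenpoly.getD m 0 ≠ 0
    · simp only [if_pos hgj]
      constructor
      · rw [List.length_set, ihl]
      · intro k
        rw [pvSet_getD, ihl, hPm]
        by_cases hk : k = i + 1 + m ∧ k < poly.length
        · obtain ⟨hk1, hk2⟩ := hk
          rw [if_pos ⟨hk1, hk2⟩, if_pos (by omega)]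
          subst hk1
          have : i + 1 + m - (i + 1) = m := by omega
          rw [this]
          unfold pvGmul
          rw [if_pos ⟨he, hgj⟩]
        · rw [if_neg hk, ihd]
          by_cases hin : i + 1 ≤ k ∧ k < i + 1 + m ∧ k < poly.length
          · rw [if_pos hin, if_pos (by omega)]
          · rw [if_neg hin, if_neg (by omega)]
    · simp only [if_neg hgj]
      push_neg at hgj
      refine ⟨ihl, fun k => ?_⟩
      rw [ihd]
      by_cases hk : k = i + 1 + m ∧ k < poly.length
      · obtain ⟨hk1, hk2⟩ := hk
        rw [if_neg (by omega), if_pos (by omega)]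
        subst hk1
        have h1 : i + 1 + m - (i + 1) = m := by omega
        rw [h1, hgj]
        unfold pvGmul
        simp
      · by_cases hin : i + 1 ≤ k ∧ k < i + 1 + m ∧ k < poly.length
        · rw [if_pos hin, if_pos (by omega)]
        · rw [if_neg hin, if_neg (by omega)]

lemma pvGmul_zero_left (b : Nat) : pvGmul 0 b = 0 := by
  unfold pvGmul; simp

lemma pvOuter_getD (poly : List Nat) (i : Nat) :
    (pvOuterStep poly i).length = poly.length ∧
    ∀ k, (pvOuterStep poly i).getD k 0
      = if i + 1 ≤ k ∧ k < i + 9 ∧ k < poly.length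
        then poly.getD k 0 ^^^ pvGmul (poly.getD i 0) (pvGenpoly.getD (k - (i + 1)) 0)
        else poly.getD k 0 := by
  by_cases he : poly.getD i 0 ≠ 0
  · have hstep : pvOuterStep poly i
        = (List.range 8).foldl (fun poly_1 j =>
            if pvGenpoly.getD j 0 ≠ 0 then
              poly_1.set (i + 1 + j)
                ((poly_1.getD (i + 1 + j) 0) ^^^
                  (pvEXP.getD ((pvLOG.getD (poly.getD i 0) 0 + pvLOG.getD (pvGenpoly.getD j 0) 0) % 31) 0))
            else poly_1) poly := by
      simp only [pvOuterStep, if_pos he]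
    obtain ⟨h1, h2⟩ := pvInner_getD i (poly.getD i 0) he poly 8
    rw [hstep]
    have h89 : i + 1 + 8 = i + 9 := by omega
    rw [h89] at h2
    exact ⟨h1, h2⟩
  · have hstep : pvOuterStep poly i = poly := by
      simp only [pvOuterStep, if_neg he]
    rw [Decidable.not_not] at he
    rw [hstep]
    refine ⟨rfl, fun k => ?_⟩
    rw [he]
    split <;> simp [pvGmul_zero_left]

def pvCA (L0 : List Nat) (m : Nat) : Nat := (L0.take m).foldl polyMod 0

def pvInv (L0 : List Nat) (i : Nat) (poly : List Nat) : Prop :=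
  poly.length = L0.length ∧ (∀ k, poly.getD k 0 < 32) ∧
  (∀ k, i + 8 ≤ k → poly.getD k 0 = L0.getD k 0) ∧
  pvPack (pvWin poly i) = pvCA L0 (i + 8)

lemma pvGetD_lt (L0 : List Nat) (hL : ∀ x ∈ L0, x < 32) (k : Nat) : L0.getD k 0 < 32 := by
  rw [List.getD_eq_getElem?_getD]
  match h : L0[k]? with
  | none => simp
  | some x =>
    have := hL x (List.mem_of_getElem? h)
    simpa using this

lemma pvInv_init (L0 : List Nat) (h9 : 9 ≤ L0.length) (hL : ∀ x ∈ L0, x < 32) :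
    pvInv L0 0 L0 := by
  refine ⟨rfl, pvGetD_lt L0 hL, fun k _ => rfl, ?_⟩
  rw [pvWin_eq_drop L0 0 (by omega), List.drop_zero]
  unfold pvCA
  rw [pvPack_foldl_polyMod (L0.take 8) (fun x hx => hL x (List.take_subset 8 L0 hx))
    (by simp)]

lemma pvInv_step (L0 : List Nat) (i : Nat) (poly : List Nat)
    (hL : ∀ x ∈ L0, x < 32) (hi : i + 9 ≤ L0.length) (h : pvInv L0 i poly) :
    pvInv L0 (i + 1) (pvOuterStep poly i) := by
  obtain ⟨hlen, hent, hut, hwin⟩ := h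
  obtain ⟨hlen', hgd⟩ := pvOuter_getD poly i
  set e := poly.getD i 0 with hedef
  have he32 : e < 32 := hent i
  set s := L0.getD (i + 8) 0 with hsdef
  have hs32 : s < 32 := pvGetD_lt L0 hL _
  have hps : poly.getD (i + 8) 0 = s := hut (i + 8) (by omega)
  refine ⟨by rw [hlen', hlen], ?_, ?_, ?_⟩
  · intro k
    rw [hgd]
    split
    · exact pvXor_lt32 (hent k) (pvGmul_lt e (pvGenpoly.getD (k - (i + 1)) 0))
    · exact hent k
  · intro k hk
    rw [hgd, if_neg (by omega)]
    exact hut k (by omega)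
  · -- the window shifts one symbol and absorbs the generator row
    set rest : List Nat := (List.range 7).map (fun j => poly.getD (i + 1 + j) 0) with hrestdef
    have hrest_lt : ∀ y ∈ rest, y < 32 := by
      intro y hy
      simp only [hrestdef, List.mem_map] at hy
      obtain ⟨j, _, rfl⟩ := hy
      exact hent _
    have hrest_len : rest.length = 7 := by simp [hrestdef]
    -- old window = e :: rest
    have h1 : pvWin poly i = e :: rest := by
      apply List.ext_getElem
      · simp [pvWin, hrestdef]
      · intro k hk1 hk2
        match k with
        | 0 =>
          simp only [pvWin, List.getElem_map, List.getElem_range, List.getElem_cons_zero]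
          rw [hedef]
          norm_num
        | (k+1) =>
          simp only [pvWin, List.getElem_map, List.getElem_range, List.getElem_cons_succ,
            hrestdef]
          congr 1
          omega
    -- old window shifted = rest ++ [s]
    have h2 : pvWin poly (i + 1) = rest ++ [s] := by
      unfold pvWin
      rw [List.range_succ]
      simp only [List.map_append, List.map_cons, List.map_nil]
      congr 1
      rw [← hps]
    -- new window = pointwise xor of old shifted window and the generator row
    have h3 : pvWin (pvOuterStep poly i) (i + 1)
        = (List.range 8).map (fun j => poly.getD (i + 1 + j) 0 ^^^ pvGmul e (pvGenpoly.getD j 0)) := by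
      unfold pvWin
      apply List.map_congr_left
      intro j hj
      rw [List.mem_range] at hj
      have : i + 1 + j < poly.length := by omega
      rw [hgd, if_pos ⟨by omega, by omega, this⟩]
      have hj1 : i + 1 + j - (i + 1) = j := by omega
      rw [hj1]
    have h4 : pvPack (pvWin (pvOuterStep poly i) (i + 1))
        = pvPack (pvWin poly (i + 1)) ^^^ pvGenmask e := by
      rw [h3, pvPack_xor_map 8 _ _ (fun j => hent _) (fun j => pvGmul_lt _ _)]
      rw [pvGenmask_eq he32]
      rfl
    -- A-side step on the prefix
    have hlt : i + 8 < L0.length := by omega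
    have htake : L0.take (i + 9) = L0.take (i + 8) ++ [s] := by
      have : i + 9 = (i + 8) + 1 := by omega
      rw [this, List.take_succ, List.getElem?_eq_getElem hlt]
      simp [hsdef, List.getD_eq_getElem?_getD, List.getElem?_eq_getElem hlt]
    have hCA : pvCA L0 (i + 9) = polyMod (pvCA L0 (i + 8)) s := by
      unfold pvCA
      rw [htake, List.foldl_append]
      rfl
    -- compute polyMod on the packed old window
    have hpackrest_lt : pvPack rest < 2 ^ 35 := by
      have := pvPack_lt rest hrest_lt
      rw [hrest_len] at this
      norm_num at this ⊢
      omega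
    have hpackw : pvPack (pvWin poly i) = 2 ^ 35 * e + pvPack rest := by
      rw [h1, pvPack_cons e rest he32 hrest_lt, hrest_len]
      have h57 : (32 : Nat) ^ 7 = 2 ^ 35 := by norm_num
      rw [h57]
      omega
    have hshift : pvPack (pvWin poly i) >>> 35 = e := by
      rw [hpackw, Nat.shiftRight_eq_div_pow]
      rw [Nat.mul_add_div (by norm_num)]
      rw [Nat.div_eq_of_lt hpackrest_lt]
      omega
    have hand : pvPack (pvWin poly i) &&& 0x7FFFFFFFF = pvPack rest := by
      have hm : (0x7FFFFFFFF : Nat) = 2 ^ 35 - 1 := by norm_num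
      rw [hpackw, hm, Nat.and_two_pow_sub_one_eq_mod]
      rw [Nat.mul_add_mod]
      exact Nat.mod_eq_of_lt hpackrest_lt
    have h5 : polyMod (pvPack (pvWin poly i)) s = pvPack (rest ++ [s]) ^^^ pvGenmask e := by
      rw [pvPolyMod_split, hshift, hand, pvXorLow32 _ s hs32, pvPack_concat rest s hs32]
    rw [h4, h2, ← hwin] at *
    rw [hCA, ← hwin, h5, h2]

lemma pvInv_all (L0 : List Nat) (hL : ∀ x ∈ L0, x < 32) (h9 : 9 ≤ L0.length) :
    ∀ i, i ≤ L0.length - 8 → pvInv L0 i ((List.range i).foldl pvOuterStep L0) := by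
  intro i
  induction i with
  | zero => intro _; exact pvInv_init L0 h9 hL
  | succ i ih =>
    intro hle
    rw [List.range_succ, List.foldl_append]
    simp only [List.foldl_cons, List.foldl_nil]
    exact pvInv_step L0 i _ hL (by omega) (ih (by omega))

lemma pvDivision (symbols : List Nat) (hsym : ∀ x ∈ symbols, x < 32) :
    (((List.range ((1 :: (symbols ++ List.replicate 8 0)).length - 8)).foldl
        (fun (poly : List Nat) (i : Nat) =>
          if poly.getD i 0 ≠ 0 then
            (List.range 8).foldl (fun poly_1 j =>
              if pvGenpoly.getD j 0 ≠ 0 then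
                poly_1.set (i + 1 + j)
                  ((poly_1.getD (i + 1 + j) 0) ^^^
                    (pvEXP.getD ((pvLOG.getD (poly.getD i 0) 0 + pvLOG.getD (pvGenpoly.getD j 0) 0) % 31) 0))
              else poly_1) poly
          else poly)
        (1 :: (symbols ++ List.replicate 8 0))).drop
      (((List.range ((1 :: (symbols ++ List.replicate 8 0)).length - 8)).foldl
        (fun (poly : List Nat) (i : Nat) =>
          if poly.getD i 0 ≠ 0 then
            (List.range 8).foldl (fun poly_1 j =>
              if pvGenpoly.getD j 0 ≠ 0 then
                poly_1.set (i + 1 + j)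
                  ((poly_1.getD (i + 1 + j) 0) ^^^
                    (pvEXP.getD ((pvLOG.getD (poly.getD i 0) 0 + pvLOG.getD (pvGenpoly.getD j 0) 0) % 31) 0))
              else poly_1) poly
          else poly)
        (1 :: (symbols ++ List.replicate 8 0))).length - 8)).foldl (fun c s => (c <<< 5) ||| s) 0
      = (symbols ++ List.replicate 8 0).foldl polyMod 1 := by
  have hconv : (fun (poly : List Nat) (i : Nat) =>
          if poly.getD i 0 ≠ 0 then
            (List.range 8).foldl (fun poly_1 j =>
              if pvGenpoly.getD j 0 ≠ 0 then
                poly_1.set (i + 1 + j)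
                  ((poly_1.getD (i + 1 + j) 0) ^^^
                    (pvEXP.getD ((pvLOG.getD (poly.getD i 0) 0 + pvLOG.getD (pvGenpoly.getD j 0) 0) % 31) 0))
              else poly_1) poly
          else poly) = pvOuterStep := rfl
  rw [hconv]
  set L0 := 1 :: (symbols ++ List.replicate 8 0) with hL0
  have hlen : L0.length = symbols.length + 9 := by simp [hL0]
  have hL : ∀ x ∈ L0, x < 32 := by
    intro x hx
    rw [hL0] at hx
    rcases List.mem_cons.1 hx with h | h
    · omega
    · rcases List.mem_append.1 h with h | h
      · exact hsym x h
      · have := List.eq_of_mem_replicate h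
        omega
  have h9 : 9 ≤ L0.length := by omega
  have hinv := pvInv_all L0 hL h9 (L0.length - 8) (by omega)
  obtain ⟨hflen, -, -, hfwin⟩ := hinv
  set F := (List.range (L0.length - 8)).foldl pvOuterStep L0 with hF
  have hwin_drop : pvWin F (L0.length - 8) = F.drop (L0.length - 8) := by
    rw [pvWin_eq_drop F (L0.length - 8) (by omega)]
    apply List.take_of_length_le
    rw [List.length_drop, hflen]
    omega
  have htakeall : L0.take (L0.length - 8 + 8) = L0 := List.take_of_length_le (by omega)
  have hCAfull : pvCA L0 (L0.length - 8 + 8) = (symbols ++ List.replicate 8 0).foldl polyMod 1 := by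
    unfold pvCA
    rw [htakeall, hL0, List.foldl_cons]
    have h01 : polyMod 0 1 = 1 := by decide
    rw [h01]
  rw [hflen]
  show pvPack (F.drop (L0.length - 8)) = _
  rw [← hwin_drop, hfwin, hCAfull]

-- ---------- symbol bounds ----------

lemma pvChunk3_mem (ps : List Nat) : ∀ grp ∈ pvChunk3 ps, grp.length ≤ 3 ∧ grp ⊆ ps := by
  induction ps using pvChunk3.induct with
  | case1 => intro grp hg; simp [pvChunk3] at hg
  | case2 p t ih =>
    intro grp hg
    rw [pvChunk3] at hg
    rcases List.mem_cons.1 hg with h | h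
    · subst h
      constructor
      · simp only [List.length_cons, List.length_take]; omega
      · intro x hx
        rcases List.mem_cons.1 hx with h | h
        · simp [h]
        · exact List.mem_cons_of_mem p (List.take_subset 2 t h)
    · obtain ⟨h1, h2⟩ := ih grp h
      exact ⟨h1, fun x hx => List.mem_cons_of_mem p (List.drop_subset 2 t (h2 hx))⟩

lemma pvCls_lt (grp : List Nat) (hlen : grp.length ≤ 3) (hb : ∀ p ∈ grp, p < 96) :
    grp.foldl (fun cl p => cl * 3 + (p >>> 5)) 0 < 32 := by
  have hsh : ∀ p ∈ grp, p >>> 5 ≤ 2 := by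
    intro p hp
    rw [Nat.shiftRight_eq_div_pow]
    have := hb p hp
    omega
  match grp with
  | [] => norm_num
  | [a] =>
    have := hsh a (by simp)
    simp only [List.foldl_cons, List.foldl_nil]
    omega
  | [a, b] =>
    have h1 := hsh a (by simp)
    have h2 := hsh b (by simp)
    simp only [List.foldl_cons, List.foldl_nil]
    omega
  | [a, b, c] =>
    have h1 := hsh a (by simp)
    have h2 := hsh b (by simp)
    have h3 := hsh c (by simp)
    simp only [List.foldl_cons, List.foldl_nil]
    omega
  | _ :: _ :: _ :: _ :: _ => simp at hlen; omega

lemma pvSymbols_lt (ps : List Nat) (hps : ∀ p ∈ ps, p < 96) :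
    ∀ x ∈ (pvChunk3 ps).flatMap (fun grp =>
      grp.map (fun p => p &&& 31) ++ [grp.foldl (fun cl p => cl * 3 + (p >>> 5)) 0]), x < 32 := by
  intro x hx
  rw [List.mem_flatMap] at hx
  obtain ⟨grp, hgrp, hxg⟩ := hx
  obtain ⟨hlen, hsub⟩ := pvChunk3_mem ps grp hgrp
  rcases List.mem_append.1 hxg with h | h
  · rw [List.mem_map] at h
    obtain ⟨p, _, rfl⟩ := h
    have := Nat.and_le_right (n := p) (m := 31)
    omega
  · rw [List.mem_singleton] at h
    subst h
    exact pvCls_lt grp hlen (fun p hp => hps p (hsub hp))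

-- ===== VERDICT (by name: the statement is the Claim_ definition above) =====
theorem descriptor_checksum_spec : Claim_equal_descriptor_checksum := by
  intro desc _
  show descriptor_checksum desc = descriptor_checksum_alt desc
  by_cases hinv : ∃ ch ∈ desc.toList, pvPosA ch = -1
  · have hA : desc.toList.foldl pvStepA (some (1, 0, 0)) = none :=
      pvAfoldInvalid desc.toList hinv (1, 0, 0)
    have hB : pvPositions desc.toList = none := pvPositions_invalid desc.toList hinv
    simp [descriptor_checksum, descriptor_checksum_alt, hA, hB]
  · have hv : ∀ ch ∈ desc.toList, pvPosA ch ≠ -1 :=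
      fun ch hc he => hinv ⟨ch, hc, he⟩
    have hA := pvAfoldValid desc.toList hv (1, 0, 0)
    have hB := pvPositions_valid desc.toList hv
    have hbound : ∀ p ∈ desc.toList.map (fun ch => (pvPosA ch).toNat), p < 96 := by
      intro p hp
      rw [List.mem_map] at hp
      obtain ⟨ch, hch, rfl⟩ := hp
      have := pvPos_lt (hv ch hch)
      omega
    have hsym := pvSymbols_lt (desc.toList.map (fun ch => (pvPosA ch).toNat)) hbound
    have hdiv := pvDivision
      ((pvChunk3 (desc.toList.map (fun ch => (pvPosA ch).toNat))).flatMap (fun grp =>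
        grp.map (fun p => p &&& 31) ++ [grp.foldl (fun cl p => cl * 3 + (p >>> 5)) 0])) hsym
    simp only [descriptor_checksum, descriptor_checksum_alt, hA, hB]
    set ps := desc.toList.map (fun ch => (pvPosA ch).toNat) with hps
    set F := List.foldl pvStep (1, 0, 0) ps with hF
    have hCAeq : (fun grp : List Nat =>
        grp.map (fun p => p &&& 31) ++ [grp.foldl (fun cl p => cl * 3 + (p >>> 5)) 0])
        = pvChunkArgs := rfl
    -- A's post-loop: the conditional final class is pvFinal, the zero loop appends 8 zeros
    have hAkey : (List.range 8).foldl (fun c _ => polyMod c 0)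
        (if F.2.2 > 0 then polyMod F.1 F.2.1 else F.1)
        = ((pvChunk3 ps).flatMap (fun grp : List Nat =>
            grp.map (fun p => p &&& 31) ++ [grp.foldl (fun cl p => cl * 3 + (p >>> 5)) 0])
            ++ List.replicate 8 0).foldl polyMod 1 := by
      have h0 : (if F.2.2 > 0 then polyMod F.1 F.2.1 else F.1) = pvFinal F := rfl
      rw [h0, hF, ← pvRep8, pvMain ps 1, ← hCAeq, ← List.foldl_append]
    rw [hAkey, ← hdiv]
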